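-- pv_equiv track=rewrite | github.com/jinukim-ml/coding-test-prep | Programmers/Exhaustive search/86491.py | solution
-- ===== SOURCE A (Python) =====
-- def solution(sizes):
--     width = []
--     height = []
--     for i in range(len(sizes)):
--         width.append(sizes[i][0])
--         height.append(sizes[i][1])
--
--     max_width = max(width)
--     max_height = max(height)
--
--     if max_width >= max_height:
--         orientation = 0
--     else:
--         orientation = 1
--
--     for i in range(len(sizes)):
--         if sizes[i][orientation] == max(width[i], height[i]):
--             continue
--         else:
--             width[i], height[i] = height[i], width[i]
--
--     return max(width)*max(height)
-- ===== SOURCE B (Python) =====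
-- def solution(sizes):
--     return max(max(s[0], s[1]) for s in sizes) * max(min(s[0], s[1]) for s in sizes)
-- ===== Notes on version B (the rewrite author's own statement) =====
-- stated objective: simpler
-- what changed: B drops A's parallel width/height lists, the global orientation branch and the in-place swap pass, computing the answer directly as (max over cards of the larger side) * (max over cards of the smaller side).
import Mathlib
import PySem

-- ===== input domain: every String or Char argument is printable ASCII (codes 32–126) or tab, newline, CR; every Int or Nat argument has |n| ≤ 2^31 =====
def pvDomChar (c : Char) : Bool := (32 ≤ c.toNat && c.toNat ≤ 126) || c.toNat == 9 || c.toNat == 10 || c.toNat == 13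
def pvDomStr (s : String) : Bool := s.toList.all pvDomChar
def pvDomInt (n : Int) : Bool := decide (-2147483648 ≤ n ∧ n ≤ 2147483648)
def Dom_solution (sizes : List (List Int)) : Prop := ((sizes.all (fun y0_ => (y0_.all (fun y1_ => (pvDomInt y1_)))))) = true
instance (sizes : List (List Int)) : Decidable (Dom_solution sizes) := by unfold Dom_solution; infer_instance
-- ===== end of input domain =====

-- B replaces A's parallel width/height lists, orientation branch and swap pass by the
-- direct closed form max(larger sides) * max(smaller sides); same O(n), simpler.

-- ===== PORT A =====
def solution (sizes : List (List Int)) : Int :=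
  let n : Int := sizes.length
  -- first loop: build width/height by appending sizes[i][0] / sizes[i][1]
  let wh := (PySem.List.pyRange 0 n 1).foldl
    (fun (acc : List Int × List Int) i =>
      (acc.1 ++ [PySem.List.pyGetD (PySem.List.pyGetD sizes i []) 0 0],
       acc.2 ++ [PySem.List.pyGetD (PySem.List.pyGetD sizes i []) 1 0]))
    ([], [])
  let width := wh.1
  let height := wh.2
  let max_width := (PySem.List.max? width (fun x => x)).getD 0
  let max_height := (PySem.List.max? height (fun x => x)).getD 0
  let orientation : Int := if max_width ≥ max_height then 0 else 1
  -- second loop: swap width[i]/height[i] unless sizes[i][orientation] == max(width[i], height[i])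
  let wh2 := (PySem.List.pyRange 0 n 1).foldl
    (fun (acc : List Int × List Int) i =>
      let wi := PySem.List.pyGetD acc.1 i 0
      let hi := PySem.List.pyGetD acc.2 i 0
      if PySem.List.pyGetD (PySem.List.pyGetD sizes i []) orientation 0 = max wi hi then acc
      else (PySem.List.pySetD acc.1 i hi, PySem.List.pySetD acc.2 i wi))
    (width, height)
  ((PySem.List.max? wh2.1 (fun x => x)).getD 0) * ((PySem.List.max? wh2.2 (fun x => x)).getD 0)

-- ===== PORT B =====
def solution_alt (sizes : List (List Int)) : Int :=
  ((PySem.List.max? (sizes.map (fun s => max (PySem.List.pyGetD s 0 0) (PySem.List.pyGetD s 1 0))) (fun x => x)).getD 0) *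
  ((PySem.List.max? (sizes.map (fun s => min (PySem.List.pyGetD s 0 0) (PySem.List.pyGetD s 1 0))) (fun x => x)).getD 0)

-- ===== PRECONDITION & SPEC =====
-- Pre_ excludes exactly where the Python A raises: max([]) (ValueError) on empty input,
-- and sizes[i][0]/sizes[i][1] (IndexError) on a card with fewer than 2 entries.
def Pre_solution (sizes : List (List Int)) : Prop :=
  sizes ≠ [] ∧ ∀ s ∈ sizes, 2 ≤ s.length
instance (sizes : List (List Int)) : Decidable (Pre_solution sizes) := by
  unfold Pre_solution; infer_instance
def pvWitness_solution : List (List Int) := [[60, 50], [30, 70], [60, 30], [80, 40]]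

def Spec_solution (sizes : List (List Int)) (out : Int) : Prop := out = solution_alt sizes
instance (sizes : List (List Int)) (out : Int) : Decidable (Spec_solution sizes out) := by
  unfold Spec_solution; infer_instance

-- ===== CLAIM (what is proved, stated in full; the proofs are below) =====
def Claim_equal_solution : Prop :=
  ∀ (sizes : List (List Int)), Dom_solution sizes → Pre_solution sizes →
    Spec_solution sizes (solution sizes)

-- ===== LEMMAS AND PROOFS =====

-- abbreviations for the two per-card lookups (proof-only helpers)
def pvG0 (s : List Int) : Int := PySem.List.pyGetD s 0 0
def pvG1 (s : List Int) : Int := PySem.List.pyGetD s 1 0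
-- what A's swap pass leaves at index i, as a function of the card and orientation
def pvF0 (o : Int) (s : List Int) : Int :=
  if PySem.List.pyGetD s o 0 = max (pvG0 s) (pvG1 s) then pvG0 s else pvG1 s
def pvF1 (o : Int) (s : List Int) : Int :=
  if PySem.List.pyGetD s o 0 = max (pvG0 s) (pvG1 s) then pvG1 s else pvG0 s

-- A's first loop is the pair of maps (width, height) = (map pvG0, map pvG1)
theorem pv_build_loop (sizes : List (List Int)) (a b : List Int) :
    sizes.foldl (fun (acc : List Int × List Int) row =>
      (acc.1 ++ [pvG0 row], acc.2 ++ [pvG1 row])) (a, b)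
    = (a ++ sizes.map pvG0, b ++ sizes.map pvG1) := by
  induction sizes generalizing a b with
  | nil => simp
  | cons s t ih => simp [List.foldl_cons, ih]

-- A's swap loop, characterised prefix by prefix
theorem pv_swap_loop (sizes : List (List Int)) (o : Int) (m : Nat) (hm : m ≤ sizes.length) :
    (PySem.List.pyRange 0 (m : Int) 1).foldl
      (fun (acc : List Int × List Int) i =>
        let wi := PySem.List.pyGetD acc.1 i 0
        let hi := PySem.List.pyGetD acc.2 i 0
        if PySem.List.pyGetD (PySem.List.pyGetD sizes i []) o 0 = max wi hi then acc
        else (PySem.List.pySetD acc.1 i hi, PySem.List.pySetD acc.2 i wi))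
      (sizes.map pvG0, sizes.map pvG1)
    = ((sizes.take m).map (pvF0 o) ++ (sizes.drop m).map pvG0,
       (sizes.take m).map (pvF1 o) ++ (sizes.drop m).map pvG1) := by
  induction m with
  | zero => simp [PySem.List.pyRange_one_eq_nil]
  | succ m ih =>
    have hm' : m ≤ sizes.length := Nat.le_of_succ_le hm
    have hlt : m < sizes.length := hm
    have hsplit : (PySem.List.pyRange 0 ((m : Int) + 1) 1)
        = PySem.List.pyRange 0 (m : Int) 1 ++ [(m : Int)] :=
      PySem.List.pyRange_one_succ_right (by exact_mod_cast Nat.zero_le m)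
    have hdrop : sizes.drop m = sizes[m] :: sizes.drop (m + 1) :=
      List.drop_eq_getElem_cons hlt
    have hlen0 : ((sizes.take m).map (pvF0 o)).length = m := by
      simp [List.length_take, Nat.min_eq_left hm']
    have hlen1 : ((sizes.take m).map (pvF1 o)).length = m := by
      simp [List.length_take, Nat.min_eq_left hm']
    have htake : sizes.take (m + 1) = sizes.take m ++ [sizes[m]] :=
      List.take_succ_eq_append_getElem hlt
    push_cast
    rw [hsplit, List.foldl_append, ih hm']
    simp only [List.foldl_cons, List.foldl_nil]
    -- evaluate the three index-m lookups and the two sets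
    have hget0 : PySem.List.pyGetD ((sizes.take m).map (pvF0 o) ++ (sizes.drop m).map pvG0)
        (m : Int) 0 = pvG0 sizes[m] := by
      rw [hdrop]; simp only [List.map_cons]
      rw [PySem.List.pyGetD_natCast, List.getD_eq_getElem?_getD,
        List.getElem?_append_right (by omega)]
      simp [Nat.min_eq_left hm']
    have hget1 : PySem.List.pyGetD ((sizes.take m).map (pvF1 o) ++ (sizes.drop m).map pvG1)
        (m : Int) 0 = pvG1 sizes[m] := by
      rw [hdrop]; simp only [List.map_cons]
      rw [PySem.List.pyGetD_natCast, List.getD_eq_getElem?_getD,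
        List.getElem?_append_right (by omega)]
      simp [Nat.min_eq_left hm']
    have hrow : PySem.List.pyGetD sizes (m : Int) [] = sizes[m] := by
      rw [PySem.List.pyGetD_natCast]; simp [List.getD_eq_getElem?_getD, hlt]
    have hset0 : PySem.List.pySetD ((sizes.take m).map (pvF0 o) ++ (sizes.drop m).map pvG0)
        (m : Int) (pvG1 sizes[m])
        = (sizes.take m).map (pvF0 o) ++ pvG1 sizes[m] :: (sizes.drop (m+1)).map pvG0 := by
      rw [hdrop]; simp only [List.map_cons]
      rw [PySem.List.pySetD_natCast, List.set_append]
      simp [Nat.min_eq_left hm']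
    have hset1 : PySem.List.pySetD ((sizes.take m).map (pvF1 o) ++ (sizes.drop m).map pvG1)
        (m : Int) (pvG0 sizes[m])
        = (sizes.take m).map (pvF1 o) ++ pvG0 sizes[m] :: (sizes.drop (m+1)).map pvG1 := by
      rw [hdrop]; simp only [List.map_cons]
      rw [PySem.List.pySetD_natCast, List.set_append]
      simp [Nat.min_eq_left hm']
    simp only [hget0, hget1, hrow, hset0, hset1, htake, List.map_append, List.map_cons]
    by_cases hc : PySem.List.pyGetD sizes[m] o 0 = max (pvG0 sizes[m]) (pvG1 sizes[m])
    · rw [if_pos hc, hdrop]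
      simp [pvF0, pvF1, hc]
      constructor <;> rw [← List.map_drop, hdrop, List.map_cons, List.map_drop]
    · rw [if_neg hc]
      simp [pvF0, pvF1, hc]

theorem pvF0_zero (s : List Int) : pvF0 0 s = max (pvG0 s) (pvG1 s) := by
  simp only [pvF0]
  have : PySem.List.pyGetD s (0 : Int) 0 = pvG0 s := rfl
  rw [this]; split <;> omega

theorem pvF1_zero (s : List Int) : pvF1 0 s = min (pvG0 s) (pvG1 s) := by
  simp only [pvF1]
  have : PySem.List.pyGetD s (0 : Int) 0 = pvG0 s := rfl
  rw [this]; split <;> omega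

theorem pvF0_one (s : List Int) : pvF0 1 s = min (pvG0 s) (pvG1 s) := by
  simp only [pvF0]
  have : PySem.List.pyGetD s (1 : Int) 0 = pvG1 s := rfl
  rw [this]; split <;> omega

theorem pvF1_one (s : List Int) : pvF1 1 s = max (pvG0 s) (pvG1 s) := by
  simp only [pvF1]
  have : PySem.List.pyGetD s (1 : Int) 0 = pvG1 s := rfl
  rw [this]; split <;> omega

-- ===== VERDICT (by name: the statement is the Claim_ definition above) =====
theorem solution_spec : Claim_equal_solution := by
  intro sizes _ _
  show solution sizes = solution_alt sizes
  unfold solution solution_alt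
  simp only []
  have hbuild : (PySem.List.pyRange 0 (sizes.length : Int) 1).foldl
      (fun (acc : List Int × List Int) i =>
        (acc.1 ++ [PySem.List.pyGetD (PySem.List.pyGetD sizes i []) 0 0],
         acc.2 ++ [PySem.List.pyGetD (PySem.List.pyGetD sizes i []) 1 0]))
      ([], [])
      = (sizes.map pvG0, sizes.map pvG1) := by
    exact (PySem.List.foldl_pyRange_zero_pyGetD' sizes ([] : List Int)
      (fun (acc : List Int × List Int) row => (acc.1 ++ [pvG0 row], acc.2 ++ [pvG1 row]))
      (([], []) : List Int × List Int)).trans (by rw [pv_build_loop]; simp)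
  rw [hbuild]
  have hswap := fun (o : Int) => pv_swap_loop sizes o sizes.length (Nat.le_refl _)
  simp only [List.take_length, List.drop_length, List.map_nil, List.append_nil] at hswap
  split
  · rw [hswap 0]
    have e0 : (pvF0 0) ∘ id = fun s => max (pvG0 s) (pvG1 s) := by
      funext s; simp [pvF0_zero]
    have e1 : (pvF1 0) ∘ id = fun s => min (pvG0 s) (pvG1 s) := by
      funext s; simp [pvF1_zero]
    simp only [show (sizes.map (pvF0 0)) = sizes.map (fun s => max (pvG0 s) (pvG1 s)) from by
        exact List.map_congr_left (fun s _ => pvF0_zero s),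
      show (sizes.map (pvF1 0)) = sizes.map (fun s => min (pvG0 s) (pvG1 s)) from by
        exact List.map_congr_left (fun s _ => pvF1_zero s)]
    rfl
  · rw [hswap 1]
    rw [show (sizes.map (pvF0 1)) = sizes.map (fun s => min (pvG0 s) (pvG1 s)) from
        List.map_congr_left (fun s _ => pvF0_one s),
      show (sizes.map (pvF1 1)) = sizes.map (fun s => max (pvG0 s) (pvG1 s)) from
        List.map_congr_left (fun s _ => pvF1_one s)]
    exact Int.mul_comm _ _
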